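-- pv_equiv track=rewrite | github.com/AdamZhouSE/pythonHomework | Code/CodeRecords/2639/60759/284023.py | longest_subl
-- ===== SOURCE A (Python) =====
-- def longest_subl(c, left_k, left_s):
--     if len(left_s) == 0:
--         return 0
--     if left_s[0] != c:
--         if left_k > 0:
--             return 1 + longest_subl(c, left_k - 1, left_s[1:])
--         return 0
--     return 1 + longest_subl(c, left_k, left_s[1:])
-- ===== SOURCE B (Python) =====
-- def longest_subl(c, left_k, left_s):
--     non_c = [i for i, ch in enumerate(left_s) if ch != c]
--     k = max(left_k, 0)
--     if len(non_c) <= k: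
--         return len(left_s)
--     return non_c[k]
-- ===== Notes on version B (the rewrite author's own statement) =====
-- stated objective: faster
-- what changed: Replaced the char-by-char recursion with slicing by a single pass that collects the indices of non-c characters, then either returns the string length or looks up the k-th such index.
import Mathlib
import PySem

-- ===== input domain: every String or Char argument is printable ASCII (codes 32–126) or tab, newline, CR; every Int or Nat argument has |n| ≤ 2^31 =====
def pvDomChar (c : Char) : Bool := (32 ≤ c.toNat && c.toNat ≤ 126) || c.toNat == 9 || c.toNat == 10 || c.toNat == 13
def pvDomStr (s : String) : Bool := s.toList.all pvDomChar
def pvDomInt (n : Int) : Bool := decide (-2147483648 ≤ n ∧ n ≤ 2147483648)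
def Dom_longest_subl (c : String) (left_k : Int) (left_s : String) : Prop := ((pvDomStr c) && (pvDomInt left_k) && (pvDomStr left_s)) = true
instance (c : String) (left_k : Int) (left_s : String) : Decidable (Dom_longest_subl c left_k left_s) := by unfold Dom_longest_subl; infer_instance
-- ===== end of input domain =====

-- B replaces A's quadratic recursion (slicing s[1:] each step) by one pass collecting non-c indices, then a lookup: faster (asymptotic).


-- ===== PORT A =====
-- A's recursion on left_s (left_s[0] is a one-character string; left_s[1:] is the tail),
-- transcribed as structural recursion on the list of characters.
def longest_sublA (c : String) (left_k : Int) (l : List Char) : Int :=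
  match l with
  | [] => 0
  | h :: t =>
    if String.mk [h] ≠ c then
      if left_k > 0 then 1 + longest_sublA c (left_k - 1) t
      else 0
    else 1 + longest_sublA c left_k t

def longest_subl (c : String) (left_k : Int) (left_s : String) : Int :=
  longest_sublA c left_k left_s.toList

-- ===== PORT B =====
-- the comprehension [i for i, ch in enumerate(left_s) if ch != c]
def nonCIdx (c : String) (i : Int) (l : List Char) : List Int :=
  match l with
  | [] => []
  | h :: t => if String.mk [h] ≠ c then i :: nonCIdx c (i + 1) t else nonCIdx c (i + 1) t

def longest_subl_alt (c : String) (left_k : Int) (left_s : String) : Int :=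
  let non_c := nonCIdx c 0 left_s.toList
  let k := max left_k 0
  if (non_c.length : Int) ≤ k then (left_s.toList.length : Int)
  else (PySem.List.pyGet? non_c k).getD 0

-- ===== PRECONDITION & SPEC =====
def Spec_longest_subl (c : String) (left_k : Int) (left_s : String) (out : Int) : Prop := out = longest_subl_alt c left_k left_s
instance (c : String) (left_k : Int) (left_s : String) (out : Int) : Decidable (Spec_longest_subl c left_k left_s out) := by unfold Spec_longest_subl; infer_instance

-- ===== CLAIM (what is proved, stated in full; the proofs are below) =====
def Claim_equal_longest_subl : Prop := ∀ (c : String) (left_k : Int) (left_s : String), Dom_longest_subl c left_k left_s → Spec_longest_subl c left_k left_s (longest_subl c left_k left_s)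

-- ===== LEMMAS AND PROOFS =====

lemma nonCIdx_shift (c : String) (l : List Char) (i : Int) :
    nonCIdx c i l = (nonCIdx c 0 l).map (· + i) := by
  induction l generalizing i with
  | nil => simp [nonCIdx]
  | cons h t ih =>
    simp only [nonCIdx, zero_add]
    split_ifs with hc
    · rw [ih (i + 1), ih 1, List.map_cons, List.map_map]
      refine congrArg₂ List.cons (by omega) (List.map_congr_left fun a _ => ?_)
      simp only [Function.comp_apply]; omega
    · rw [ih (i + 1), ih 1, List.map_map]
      exact List.map_congr_left fun a _ => by simp only [Function.comp_apply]; omega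

lemma key (c : String) (l : List Char) (k : Int) :
    longest_sublA c k l =
      (if ((nonCIdx c 0 l).length : Int) ≤ max k 0 then (l.length : Int)
       else (PySem.List.pyGet? (nonCIdx c 0 l) (max k 0)).getD 0) := by
  induction l generalizing k with
  | nil =>
    unfold longest_sublA nonCIdx
    simp
  | cons h t ih =>
    simp only [longest_sublA, nonCIdx, zero_add]
    by_cases hc : String.mk [h] ≠ c
    · rw [if_pos hc, if_pos hc, nonCIdx_shift c t 1]
      by_cases hk : k > 0
      · have hmax : max k 0 = k := by omega
        have hmax' : max (k - 1) 0 = k - 1 := by omega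
        simp only [hk, if_true, ih (k - 1), hmax, hmax']
        by_cases hlen : ((nonCIdx c 0 t).length : Int) ≤ k - 1
        · have h1 : (((0 : Int) :: (nonCIdx c 0 t).map (· + 1)).length : Int) ≤ k := by
            simp; omega
          rw [if_pos hlen, if_pos h1]
          simp only [List.length_cons]; push_cast; omega
        · have h1 : ¬ ((((0 : Int) :: (nonCIdx c 0 t).map (· + 1)).length : Int) ≤ k) := by
            simp; omega
          rw [if_neg hlen, if_neg h1]
          have hk1 : (0:Int) ≤ k - 1 := by omega
          have hk1' : (k - 1).toNat < (nonCIdx c 0 t).length := by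
            push_cast at hlen; omega
          rw [PySem.List.pyGet?_of_nonneg _ hk1,
              PySem.List.pyGet?_of_nonneg _ (by omega : (0:Int) ≤ k)]
          have hnat : k.toNat = (k - 1).toNat + 1 := by omega
          rw [hnat, List.getElem?_cons_succ, List.getElem?_map,
              List.getElem?_eq_getElem hk1']
          simp; omega
      · have hmax : max k 0 = 0 := by omega
        have hlen : ¬ ((((0 : Int) :: (nonCIdx c 0 t).map (· + 1)).length : Int) ≤ (0:Int)) := by
          simp
        simp [hk, hmax]
    · rw [if_neg hc, if_neg hc, nonCIdx_shift c t 1, ih k]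
      have hlen : (((nonCIdx c 0 t).map (· + 1)).length : Int) = ((nonCIdx c 0 t).length : Int) := by
        simp
      by_cases hl : ((nonCIdx c 0 t).length : Int) ≤ max k 0
      · have hl2 : ((((nonCIdx c 0 t).map (· + 1)).length : Int) ≤ max k 0) := by rw [hlen]; exact hl
        simp only [hl, if_true, hl2, List.length_cons]
        push_cast; omega
      · have hl2 : ¬ ((((nonCIdx c 0 t).map (· + 1)).length : Int) ≤ max k 0) := by rw [hlen]; exact hl
        simp only [hl, if_false, hl2]
        have hm : (0:Int) ≤ max k 0 := le_max_right _ _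
        have hlt : (max k 0).toNat < (nonCIdx c 0 t).length := by
          push_cast at hl; omega
        rw [PySem.List.pyGet?_of_nonneg _ hm, PySem.List.pyGet?_of_nonneg _ hm,
            List.getElem?_map, List.getElem?_eq_getElem hlt]
        simp; omega

-- ===== VERDICT (by name: the statement is the Claim_ definition above) =====
theorem longest_subl_spec : Claim_equal_longest_subl := by
  intro c left_k left_s _
  unfold Spec_longest_subl longest_subl longest_subl_alt
  exact key c left_s.toList left_k
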